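-- pv_equiv track=rewrite | github.com/KeonhoPark/algorithmStudy | BJ2447.py | pattern_3
-- ===== SOURCE A (Python) =====
-- def pattern_3(n):
--     if n == 1:
--         return ['*']
--
--     stars = pattern_3(n // 3)
--     l = []
--
--     for star in stars:
--         l.append(star * 3)
--     for star in stars:
--         l.append(star + ' '*(n//3) + star)
--     for star in stars:
--         l.append(star * 3)
--
--     return l
-- ===== SOURCE B (Python) =====
-- def pattern_3(n):
--     # bottom-up: collect the //3 chain down to 1, then grow the grid from ['*']
--     chain = []
--     m = n
--     while m != 1:
--         chain.append(m)
--         m //= 3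
--     rows = ['*']
--     for m in reversed(chain):
--         w = m // 3
--         rows = ([r * 3 for r in rows]
--                 + [r + ' ' * w + r for r in rows]
--                 + [r * 3 for r in rows])
--     return rows
-- ===== Notes on version B (the rewrite author's own statement) =====
-- stated objective: alternative
-- what changed: Replaces the top-down recursion on n//3 (which rebuilds each level from a recursive call and three append loops) with a bottom-up iteration that starts from ['*'] and triples the grid with list comprehensions until the current size equals n.
import Mathlib
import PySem

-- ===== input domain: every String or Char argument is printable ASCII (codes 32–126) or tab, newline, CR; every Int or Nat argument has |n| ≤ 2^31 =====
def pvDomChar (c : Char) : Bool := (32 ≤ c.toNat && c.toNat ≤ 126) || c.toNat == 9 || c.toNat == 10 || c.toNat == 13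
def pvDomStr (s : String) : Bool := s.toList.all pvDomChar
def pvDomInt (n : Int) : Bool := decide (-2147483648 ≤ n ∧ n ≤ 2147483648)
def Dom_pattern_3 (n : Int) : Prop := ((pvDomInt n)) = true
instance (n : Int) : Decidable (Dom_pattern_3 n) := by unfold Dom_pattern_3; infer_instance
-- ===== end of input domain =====

-- B replaces A's top-down recursion on n//3 with a bottom-up loop: it collects the //3 chain
-- down to 1 and grows the grid iteratively from ['*'] (alternative decomposition, same cost).


-- ===== PORT A =====
-- ' ' * k  (Python string repetition; empty for k ≤ 0)
def pySpaces (k : Int) : String := String.ofList (List.replicate k.toNat ' ')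

-- literal port of A; the 'else []' branch is only a totality guard: it is reached exactly
-- where the Python recursion never terminates (RecursionError), outside Pre_.
-- the Python list 'l' with its O(1) 'l.append(…)' is ported as an Array with 'push'
def pattern_3 (n : Int) : List String :=
  if n = 1 then ["*"]
  else if h : (PySem.Int.floordiv n 3).toNat < n.toNat then
    let stars := pattern_3 (PySem.Int.floordiv n 3)
    let l : Array String := #[]
    let l := stars.foldl (fun l star => l.push (star ++ star ++ star)) l
    let l := stars.foldl (fun l star => l.push (star ++ pySpaces (PySem.Int.floordiv n 3) ++ star)) l
    let l := stars.foldl (fun l star => l.push (star ++ star ++ star)) l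
    l.toList
  else []
termination_by n.toNat
decreasing_by exact h

-- ===== PORT B =====
-- 'while m != 1: chain.append(m); m //= 3' — the second branch's '[m]' tail is only a totality
-- guard, reached exactly where the Python loop never terminates (outside Pre_).
def pvChain (m : Int) : List Int :=
  if m = 1 then []
  else if h : (PySem.Int.floordiv m 3).toNat < m.toNat then
    m :: pvChain (PySem.Int.floordiv m 3)
  else [m]
termination_by m.toNat
decreasing_by exact h

def pvGrow (rows : List String) (m : Int) : List String :=
  rows.map (fun r => r ++ r ++ r)
    ++ rows.map (fun r => r ++ pySpaces (PySem.Int.floordiv m 3) ++ r)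
    ++ rows.map (fun r => r ++ r ++ r)

def pattern_3_alt (n : Int) : List String :=
  (pvChain n).reverse.foldl pvGrow ["*"]

-- ===== PRECONDITION & SPEC =====
-- Exactly the inputs on which the Python A returns: n lies in a band [3^k, 2·3^k) (elsewhere
-- iterating n //= 3 never reaches 1 and A raises RecursionError). The bound k < 32 is implied
-- by Dom (3^k ≤ n ≤ 2^31 < 3^32 forces k ≤ 19 < 32), so it excludes no input of the claim;
-- it is there only to make the existential decidable.
def Pre_pattern_3 (n : Int) : Prop := ∃ k < 32, 3 ^ k ≤ n ∧ n < 2 * 3 ^ k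
instance (n : Int) : Decidable (Pre_pattern_3 n) := by unfold Pre_pattern_3; infer_instance
def pvWitness_pattern_3 : Int := (3)

def Spec_pattern_3 (n : Int) (out : List String) : Prop := out = pattern_3_alt n
instance (n : Int) (out : List String) : Decidable (Spec_pattern_3 n out) := by unfold Spec_pattern_3; infer_instance

-- ===== CLAIM (what is proved, stated in full; the proofs are below) =====
def Claim_equal_pattern_3 : Prop := ∀ (n : Int), Dom_pattern_3 n → Pre_pattern_3 n → Spec_pattern_3 n (pattern_3 n)

-- ===== LEMMAS AND PROOFS =====

lemma pvChain_one : pvChain 1 = [] := by simp [pvChain]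

lemma pvChain_step (n : Int) (hne : n ≠ 1) (h : (PySem.Int.floordiv n 3).toNat < n.toNat) :
    pvChain n = n :: pvChain (PySem.Int.floordiv n 3) := by
  rw [pvChain, if_neg hne, dif_pos h]

lemma pvAlt_one : pattern_3_alt 1 = ["*"] := by
  simp [pattern_3_alt, pvChain_one]

lemma pvAlt_step (n : Int) (hne : n ≠ 1) (h : (PySem.Int.floordiv n 3).toNat < n.toNat) :
    pattern_3_alt n = pvGrow (pattern_3_alt (PySem.Int.floordiv n 3)) n := by
  unfold pattern_3_alt
  rw [pvChain_step n hne h]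
  simp [List.foldl_append]

lemma pvFoldl_push (f : String → String) : ∀ (xs : List String) (a : Array String),
    (xs.foldl (fun a s => a.push (f s)) a).toList = a.toList ++ xs.map f := by
  intro xs
  induction xs with
  | nil => intro a; simp
  | cons x xs ih => intro a; simp [List.foldl_cons, ih]

lemma pvA_step (n : Int) (hne : n ≠ 1) (h : (PySem.Int.floordiv n 3).toNat < n.toNat) :
    pattern_3 n = pvGrow (pattern_3 (PySem.Int.floordiv n 3)) n := by
  rw [pattern_3, if_neg hne, dif_pos h]
  simp only [pvFoldl_push]
  simp [pvGrow, List.append_assoc]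

-- the //3 step inside the band [3^k, 2·3^k)
lemma pvDiv_band (k : Nat) (n : Int) (h1 : 3 ^ (k+1) ≤ n) (h2 : n < 2 * 3 ^ (k+1)) :
    3 ^ k ≤ PySem.Int.floordiv n 3 ∧ PySem.Int.floordiv n 3 < 2 * 3 ^ k := by
  constructor
  · rw [PySem.Int.le_floordiv_iff_mul_le (by norm_num)]
    calc (3:Int) ^ k * 3 = 3 ^ (k+1) := by ring
      _ ≤ n := h1
  · rw [PySem.Int.floordiv_lt_iff_lt_mul (by norm_num)]
    calc n < 2 * 3 ^ (k+1) := h2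
      _ = 2 * 3 ^ k * 3 := by ring

lemma pvMain (k : Nat) : ∀ n : Int, 3 ^ k ≤ n → n < 2 * 3 ^ k → pattern_3 n = pattern_3_alt n := by
  induction k with
  | zero =>
    intro n h1 h2
    have hn : n = 1 := by simp at h1 h2; omega
    subst hn
    rw [pvAlt_one, pattern_3]; simp
  | succ k ih =>
    intro n h1 h2
    have hpow : (1:Int) ≤ 3 ^ k := one_le_pow₀ (by norm_num)
    have h3 : (3:Int) ^ (k+1) = 3 * 3 ^ k := by ring
    have hne : n ≠ 1 := by intro hn; rw [hn] at h1; linarith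
    obtain ⟨hb1, hb2⟩ := pvDiv_band k n h1 h2
    have hlt : PySem.Int.floordiv n 3 < n := by
      rw [PySem.Int.floordiv_lt_iff_lt_mul (by norm_num)]
      linarith
    have h : (PySem.Int.floordiv n 3).toNat < n.toNat := by omega
    rw [pvA_step n hne h, pvAlt_step n hne h, ih _ hb1 hb2]

-- ===== VERDICT (by name: the statement is the Claim_ definition above) =====
theorem pattern_3_spec : Claim_equal_pattern_3 := by
  intro n _ hpre
  obtain ⟨k, _, h1, h2⟩ := hpre
  exact pvMain k n h1 h2
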